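-- pv_equiv track=rewrite | github.com/FANATEKONA/PP2_LAB | LAB3/functions.py | has_007
-- ===== SOURCE A (Python) =====
-- def has_007(a):
--     b = []
--     for i in a:
--         if i == 7 or i == 0:
--             b.append(i)
--     for i in range(len(b)-2):
--         if b[i]==0 and b[i+1]==0 and b[i+2]==7:
--             return True
--     return False
-- ===== SOURCE B (Python) =====
-- def has_007(a):
--     z = 0
--     for i in a:
--         if i == 0:
--             z += 1
--         elif i == 7:
--             if z >= 2:
--                 return True
--             z = 0
--     return False
-- ===== Notes on version B (the rewrite author's own statement) =====
-- stated objective: simpler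
-- what changed: Replaces the intermediate filtered list and the second index-based triple scan with a single pass keeping only a count of consecutive filtered zeros.
import Mathlib
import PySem

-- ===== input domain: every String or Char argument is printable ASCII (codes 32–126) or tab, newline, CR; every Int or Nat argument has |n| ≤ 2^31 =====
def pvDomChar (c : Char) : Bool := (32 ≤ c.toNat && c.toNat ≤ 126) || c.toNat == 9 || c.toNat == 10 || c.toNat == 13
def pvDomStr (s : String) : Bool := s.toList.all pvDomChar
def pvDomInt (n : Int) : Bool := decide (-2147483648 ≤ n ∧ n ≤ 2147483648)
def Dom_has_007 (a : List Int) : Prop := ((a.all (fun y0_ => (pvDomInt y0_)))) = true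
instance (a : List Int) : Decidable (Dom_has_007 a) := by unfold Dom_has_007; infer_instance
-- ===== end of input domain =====

-- B is a simpler one-pass version: no intermediate list, no index scan — only a count of consecutive filtered zeros.

-- ===== PORT A =====
-- second loop of A: for i in range(len(b)-2): if b[i]==0 and b[i+1]==0 and b[i+2]==7: return True
def has007ScanA (b : List Int) (i : Nat) : Bool :=
  if _h : i < b.length - 2 then
    if b.getD i 0 = 0 ∧ b.getD (i+1) 0 = 0 ∧ b.getD (i+2) 0 = 7 then true
    else has007ScanA b (i+1)
  else false
termination_by b.length - i
decreasing_by omega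

def has_007 (a : List Int) : Bool :=
  let b := a.foldl (fun b i => if i = 7 ∨ i = 0 then b ++ [i] else b) []
  has007ScanA b 0

-- ===== PORT B =====
-- z counts consecutive zeros among the filtered (0/7) values seen so far
def has007Go (l : List Int) (z : Int) : Bool :=
  match l with
  | [] => false
  | i :: rest =>
    if i = 0 then has007Go rest (z + 1)
    else if i = 7 then (if z ≥ 2 then true else has007Go rest 0)
    else has007Go rest z

def has_007_alt (a : List Int) : Bool := has007Go a 0

-- ===== PRECONDITION & SPEC =====
def Spec_has_007 (a : List Int) (out : Bool) : Prop := out = has_007_alt a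
instance (a : List Int) (out : Bool) : Decidable (Spec_has_007 a out) := by unfold Spec_has_007; infer_instance

-- ===== CLAIM (what is proved, stated in full; the proofs are below) =====
def Claim_equal_has_007 : Prop := ∀ (a : List Int), Dom_has_007 a → Spec_has_007 a (has_007 a)

-- ===== LEMMAS AND PROOFS =====

/-- Reference sliding-window predicate on the filtered list. -/
def pat : List Int → Bool
  | x :: y :: w :: rest => if x = 0 ∧ y = 0 ∧ w = 7 then true else pat (y :: w :: rest)
  | _ => false

theorem scanA_eq_pat (b : List Int) (i : Nat) : has007ScanA b i = pat (b.drop i) := by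
  induction i using has007ScanA.induct (b := b) with
  | case1 i h hc =>
    have h0 : i < b.length := by omega
    have h1 : i + 1 < b.length := by omega
    have h2 : i + 2 < b.length := by omega
    have hc' : b[i] = 0 ∧ b[i+1] = 0 ∧ b[i+2] = 7 := by
      simpa [List.getElem?_eq_getElem h0, List.getElem?_eq_getElem h1,
        List.getElem?_eq_getElem h2] using hc
    rw [has007ScanA, dif_pos h, if_pos hc,
      List.drop_eq_getElem_cons h0, List.drop_eq_getElem_cons h1,
      List.drop_eq_getElem_cons h2, pat, if_pos hc']
  | case2 i h hc ih =>
    have h0 : i < b.length := by omega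
    have h1 : i + 1 < b.length := by omega
    have h2 : i + 2 < b.length := by omega
    have hc' : ¬ (b[i] = 0 ∧ b[i+1] = 0 ∧ b[i+2] = 7) := by
      simpa [List.getElem?_eq_getElem h0, List.getElem?_eq_getElem h1,
        List.getElem?_eq_getElem h2] using hc
    rw [has007ScanA, dif_pos h, if_neg hc, ih]
    conv_rhs => rw [List.drop_eq_getElem_cons h0]
    rw [List.drop_eq_getElem_cons h1, List.drop_eq_getElem_cons h2, pat, if_neg hc',
      ← List.drop_eq_getElem_cons h2, ← List.drop_eq_getElem_cons h1]
  | case3 i h =>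
    rw [has007ScanA, dif_neg h]
    have : (b.drop i).length ≤ 2 := by simp; omega
    match hd : b.drop i, this with
    | [], _ => rfl
    | [_], _ => rfl
    | [_, _], _ => rfl

theorem pat_replicate (z : Nat) : pat (List.replicate z 0) = false := by
  induction z with
  | zero => rfl
  | succ n ih =>
    match n, ih with
    | 0, _ => rfl
    | 1, _ => rfl
    | (m+2), ih => simpa [List.replicate_succ, pat] using ih

theorem pat_cons_ne (x : Int) (c : List Int) (hx : x ≠ 0) : pat (x :: c) = pat c := by
  match c with
  | [] => rfl
  | [_] => rfl
  | y :: w :: rest => simp [pat, hx]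

theorem pat_zero_seven (c : List Int) : pat (0 :: 7 :: c) = pat c := by
  match c with
  | [] => rfl
  | y :: rest =>
    rw [pat, if_neg (by norm_num)]
    exact pat_cons_ne 7 _ (by norm_num)

theorem pat_zeros_seven (z : Nat) (hz : 2 ≤ z) (c : List Int) :
    pat (List.replicate z 0 ++ 7 :: c) = true := by
  induction z with
  | zero => omega
  | succ n ih =>
    match n, ih with
    | 0, _ => omega
    | 1, _ => rfl
    | (m+2), ih =>
      have := ih (by omega)
      simpa [List.replicate_succ, pat] using this

theorem go_eq_pat (a : List Int) (z : Int) (hz : 0 ≤ z) :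
    has007Go a z = pat (List.replicate z.toNat 0 ++
      a.filter (fun i => decide (i = 7 ∨ i = 0))) := by
  induction a generalizing z with
  | nil => simpa [has007Go] using (pat_replicate z.toNat).symm
  | cons i rest ih =>
    by_cases h0 : i = 0
    · subst h0
      rw [has007Go, if_pos rfl, ih (z+1) (by omega)]
      have : (z + 1).toNat = z.toNat + 1 := by omega
      simp [this, List.replicate_succ']
    · by_cases h7 : i = 7
      · subst h7
        rw [has007Go, if_neg (by norm_num), if_pos rfl]
        by_cases hz2 : (2:Int) ≤ z
        · rw [if_pos hz2, List.filter_cons]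
          exact (pat_zeros_seven z.toNat (by omega) _).symm
        · rw [if_neg hz2, ih 0 le_rfl, List.filter_cons]
          simp only [decide_eq_true_eq]
          interval_cases z
          · exact (pat_cons_ne 7 _ (by norm_num)).symm
          · simpa [List.replicate_succ] using (pat_zero_seven _).symm
      · rw [has007Go, if_neg h0, if_neg h7, ih z hz, List.filter_cons]
        simp [h0, h7]

-- ===== VERDICT (by name: the statement is the Claim_ definition above) =====
theorem has_007_spec : Claim_equal_has_007 := by
  intro a _
  show has_007 a = has_007_alt a
  rw [has_007, has_007_alt, go_eq_pat a 0 le_rfl]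
  simp only [scanA_eq_pat, List.drop_zero,
    PySem.List.foldl_append_ite_eq_filter, List.nil_append, Int.toNat_zero,
    List.replicate_zero]
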